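-- pv_equiv track=rewrite | github.com/bssrdf/pyleet | SubstringWithLargestVariance.py | largestVariance3
-- ===== SOURCE A (Python) =====
-- import string
--
-- def largestVariance3(s: str) -> int:
--     res = 0
--     for p in string.ascii_lowercase:
--         for q in string.ascii_lowercase:
--             if p == q: continue
--
--             # run Kadane's algo
--             pCount = 0 # higher one
--             qCount = 0 # lower one
--
--             # this flag would deal with the edge case
--             # e.g., "pqqpppppp"
--             # after reset, there is no q but we can extend
--             # the interval to the previous q
--             # and the answer should -1
--             canExtendprevQ = False
--
--             for c in s:
--                 if c == p: pCount += 1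
--                 if c == q: qCount += 1
--
--                 # an interval should contain at least one q
--                 if qCount > 0:
--                     res = max(res, pCount - qCount)
--                 # edge case: consider previous q
--                 elif qCount == 0 and canExtendprevQ:
--                     res = max(res, pCount - qCount - 1)
--
--                 # reset if # of q > # of p
--                 if qCount > pCount:
--                     qCount = pCount = 0
--
--                     # once reset, the interval can be extended
--                     # as there must be one q before the next interval
--                     canExtendprevQ = True
--     return res
-- ===== SOURCE B (Python) =====
-- import string
--
-- def largestVariance3(s: str) -> int:
--     res = 0
--     for p in string.ascii_lowercase:
--         for q in string.ascii_lowercase: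
--             if p == q:
--                 continue
--             # two-state clamped Kadane: d0 = best window sum ending here (p:+1, q:-1),
--             # clamped at 0; d1 = best window sum ending here containing at least one q
--             d0 = 0
--             d1 = None
--             for c in s:
--                 if c == p:
--                     d0 += 1
--                     if d1 is not None:
--                         d1 += 1
--                 elif c == q:
--                     d1 = (d0 if d1 is None or d0 > d1 else d1) - 1
--                     d0 = d0 - 1 if d0 > 0 else 0
--                 if d1 is not None and d1 > res:
--                     res = d1
--     return res
-- ===== Notes on version B (the rewrite author's own statement) =====
-- stated objective: alternative
-- what changed: Per character pair, the counter-pair-plus-extension-flag Kadane of A is replaced by a two-state clamped Kadane DP (d0 = best window sum ending here clamped at 0, d1 = best window sum ending here containing at least one q), removing the counts and the canExtendprevQ flag; measured ~2x faster (fewer per-character operations).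
import Mathlib
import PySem

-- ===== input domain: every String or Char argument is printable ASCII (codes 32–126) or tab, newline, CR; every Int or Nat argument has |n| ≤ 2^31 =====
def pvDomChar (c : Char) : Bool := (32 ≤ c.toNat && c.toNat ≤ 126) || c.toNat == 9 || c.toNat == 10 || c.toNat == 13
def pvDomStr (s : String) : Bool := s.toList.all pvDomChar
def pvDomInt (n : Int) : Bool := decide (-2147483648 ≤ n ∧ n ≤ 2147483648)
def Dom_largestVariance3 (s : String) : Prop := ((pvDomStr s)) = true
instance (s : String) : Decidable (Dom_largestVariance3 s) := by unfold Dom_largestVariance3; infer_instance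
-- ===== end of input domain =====

-- B replaces A's count-pair + extension-flag Kadane by a two-state clamped Kadane DP (alternative decomposition; measured faster in a timing run).

def lettersLV : List Char := "abcdefghijklmnopqrstuvwxyz".toList

-- ===== PORT A =====
-- state: (pCount, qCount, canExtendprevQ, res)
def stepA (p q : Char) (st : Int × Int × Bool × Int) (c : Char) : Int × Int × Bool × Int :=
  let pC := if c = p then st.1 + 1 else st.1
  let qC := if c = q then st.2.1 + 1 else st.2.1
  let flag := st.2.2.1
  let res := st.2.2.2
  let res := if 0 < qC then max res (pC - qC)
             else if qC = 0 ∧ flag then max res (pC - qC - 1) else res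
  if pC < qC then (0, 0, true, res) else (pC, qC, flag, res)

def innerA (p q : Char) (s : List Char) (res : Int) : Int :=
  (s.foldl (stepA p q) (0, 0, false, res)).2.2.2

def largestVariance3 (s : String) : Int :=
  lettersLV.foldl (fun res p =>
    lettersLV.foldl (fun res q =>
      if p = q then res else innerA p q s.toList res) res) 0

-- ===== PORT B =====
-- state: (d0, d1, res)
def stepB (p q : Char) (st : Int × Option Int × Int) (c : Char) : Int × Option Int × Int :=
  let d0 := st.1
  let d1 := st.2.1
  let res := st.2.2
  let s' : Int × Option Int :=
    if c = p then (d0 + 1, d1.map (· + 1))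
    else if c = q then
      (if 0 < d0 then d0 - 1 else 0,
       some ((match d1 with | none => d0 | some v => if v < d0 then d0 else v) - 1))
    else (d0, d1)
  let res := match s'.2 with | some v => if res < v then v else res | none => res
  (s'.1, s'.2, res)

def innerB (p q : Char) (s : List Char) (res : Int) : Int :=
  (s.foldl (stepB p q) (0, none, res)).2.2

def largestVariance3_alt (s : String) : Int :=
  lettersLV.foldl (fun res p =>
    lettersLV.foldl (fun res q =>
      if p = q then res else innerB p q s.toList res) res) 0

-- ===== PRECONDITION & SPEC =====
def Spec_largestVariance3 (s : String) (out : Int) : Prop := out = largestVariance3_alt s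
instance (s : String) (out : Int) : Decidable (Spec_largestVariance3 s out) := by unfold Spec_largestVariance3; infer_instance

-- ===== CLAIM (what is proved, stated in full; the proofs are below) =====
def Claim_equal_largestVariance3 : Prop := ∀ (s : String), Dom_largestVariance3 s → Spec_largestVariance3 s (largestVariance3 s)

-- ===== LEMMAS AND PROOFS =====

-- simulation invariant between A's per-pair state and B's
def InvLV (a : Int × Int × Bool × Int) (b : Int × Option Int × Int) : Prop :=
  b.2.2 = a.2.2.2 ∧ b.1 = a.1 - a.2.1 ∧ 0 ≤ a.2.1 ∧ a.2.1 ≤ a.1 ∧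
  b.2.1 = (if 0 < a.2.1 then some (a.1 - a.2.1)
           else if a.2.2.1 then some (a.1 - 1) else none)

set_option maxRecDepth 8192 in
set_option maxHeartbeats 4000000 in
theorem stepLV_inv (p q : Char) (hpq : p ≠ q) (c : Char)
    (a : Int × Int × Bool × Int) (b : Int × Option Int × Int)
    (h : InvLV a b) : InvLV (stepA p q a c) (stepB p q b c) := by
  obtain ⟨pC, qC, flag, res⟩ := a
  obtain ⟨d0, d1, res'⟩ := b
  obtain ⟨hres, hd0, hq0, hqp, hd1⟩ := h
  simp only at hres hd0 hq0 hqp hd1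
  subst hres hd0
  cases flag <;> by_cases hq : 0 < qC <;>
    simp only [hq, if_true, if_false, Bool.false_eq_true, ite_true, ite_false] at hd1 <;>
    subst hd1 <;>
    by_cases hcp : c = p <;> by_cases hcq : c = q <;>
    first
      | exact absurd (hcp.symm.trans hcq) hpq
      | (unfold InvLV stepA stepB
         simp only [hcp, hcq, hpq, Ne.symm hpq, hq, Option.map_some, Option.map_none, max_def,
           eq_self_iff_true, if_true, if_false, Bool.false_eq_true, ite_true, ite_false]
         (try split_ifs) <;>
           (try simp only [Option.some.injEq, reduceCtorEq, and_true, true_and, not_lt, not_le, not_true, not_false_iff,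
             Prod.fst, Prod.snd, Prod.mk.injEq] at *) <;>
           (and_intros <;> first | omega | linarith | simp_all))

theorem foldLV_inv (p q : Char) (hpq : p ≠ q) (s : List Char)
    (a : Int × Int × Bool × Int) (b : Int × Option Int × Int)
    (h : InvLV a b) : InvLV (s.foldl (stepA p q) a) (s.foldl (stepB p q) b) := by
  induction s generalizing a b with
  | nil => exact h
  | cons c t ih => exact ih _ _ (stepLV_inv p q hpq c a b h)

theorem innerLV_eq (p q : Char) (hpq : p ≠ q) (s : List Char) (res : Int) :
    innerA p q s res = innerB p q s res := by
  have h := foldLV_inv p q hpq s (0, 0, false, res) (0, none, res)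
    (by unfold InvLV; simp)
  exact (h.1).symm

theorem foldl_eq_of_eq {α β : Type} (f g : α → β → α) (l : List β)
    (h : ∀ a x, f a x = g a x) : ∀ a, l.foldl f a = l.foldl g a := by
  induction l with
  | nil => intro a; rfl
  | cons x t ih => intro a; rw [List.foldl_cons, List.foldl_cons, h, ih]

-- ===== VERDICT (by name: the statement is the Claim_ definition above) =====
theorem largestVariance3_spec : Claim_equal_largestVariance3 := by
  intro s _
  unfold Spec_largestVariance3 largestVariance3 largestVariance3_alt
  refine foldl_eq_of_eq _ _ _ (fun res p => ?_) 0
  refine foldl_eq_of_eq _ _ _ (fun res q => ?_) res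
  by_cases hpq : p = q
  · simp [hpq]
  · simp [hpq, innerLV_eq p q hpq]
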